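-- pv_equiv track=rewrite | github.com/Kreager-Lolec/debtBot | app.py | bracketindex
-- ===== SOURCE A (Python) =====
-- def bracketindex(eq):
--     leftbracket = -1
--     rightbracket = -1
--     i = 0
--     while i < len(eq):
--         if eq[i] == "(":
--             leftbracket = i
--         if eq[i] == ")":
--             rightbracket = i
--             break
--         i += 1
--     return leftbracket, rightbracket
-- ===== SOURCE B (Python) =====
-- def positions(eq, c):
--     return [i for i, ch in enumerate(eq) if ch == c]
--
-- def bracketindex(eq):
--     opens = positions(eq, '(')
--     closes = positions(eq, ')')
--     r = closes[0] if closes else -1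
--     cand = opens if r == -1 else [i for i in opens if i < r]
--     l = cand[-1] if cand else -1
--     return l, r
-- ===== Notes on version B (the rewrite author's own statement) =====
-- stated objective: alternative
-- what changed: Replaces the stateful while-loop with early break by three staged comprehension passes: build the full index lists of '(' and ')' positions via enumerate, take the head of the closers as r, filter the openers below r and take the last.
import Mathlib
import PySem

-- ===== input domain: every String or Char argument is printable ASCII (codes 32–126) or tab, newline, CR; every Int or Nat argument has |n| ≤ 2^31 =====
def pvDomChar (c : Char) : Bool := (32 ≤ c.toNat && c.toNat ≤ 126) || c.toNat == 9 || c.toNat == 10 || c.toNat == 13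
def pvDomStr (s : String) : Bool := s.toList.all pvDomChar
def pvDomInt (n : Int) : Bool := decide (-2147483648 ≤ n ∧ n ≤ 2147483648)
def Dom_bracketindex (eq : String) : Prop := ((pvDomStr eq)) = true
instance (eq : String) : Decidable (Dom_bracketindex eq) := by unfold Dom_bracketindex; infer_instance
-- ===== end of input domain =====

-- B replaces A's stateful break-loop by staged comprehension passes: enumerate all '(' and ')' positions, take the head of the closers, filter the openers below it, take the last.

-- ===== PORT A =====
-- the while-loop: i is the current index, lb the last '(' seen; break at the first ')'
def bracketindexGo : List Char → Int → Int → Int × Int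
  | [], _, lb => (lb, -1)
  | c :: cs, i, lb =>
    let lb' := if c = '(' then i else lb
    if c = ')' then (lb', i) else bracketindexGo cs (i + 1) lb'

def bracketindex (eq : String) : Int × Int :=
  bracketindexGo eq.toList 0 (-1)

-- ===== PORT B =====
-- Source B's helper: [i for i, ch in enumerate(eq) if ch == c]
def positions (eq : String) (c : Char) : List Int :=
  ((PySem.List.enumerate eq.toList 0).filter (fun p => p.2 = c)).map (fun p => p.1)

def bracketindex_alt (eq : String) : Int × Int :=
  let opens := positions eq '('
  let closes := positions eq ')'
  let r : Int := match closes with | [] => -1 | c :: _ => c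
  let cand := if r = -1 then opens else opens.filter (fun i => decide (i < r))
  let l : Int := match cand.getLast? with | none => -1 | some x => x
  (l, r)

-- ===== PRECONDITION & SPEC =====
def Spec_bracketindex (eq : String) (out : Int × Int) : Prop := out = bracketindex_alt eq
instance (eq : String) (out : Int × Int) : Decidable (Spec_bracketindex eq out) := by unfold Spec_bracketindex; infer_instance

-- ===== CLAIM (what is proved, stated in full; the proofs are below) =====
def Claim_equal_bracketindex : Prop := ∀ (eq : String), Dom_bracketindex eq → Spec_bracketindex eq (bracketindex eq)

-- ===== LEMMAS AND PROOFS =====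

-- index of the last occurrence of c in a list (spec helper used only by the proofs)
def lastIdx (c : Char) : List Char → Option Nat
  | [] => none
  | h :: t =>
    match lastIdx c t with
    | some j => some (j + 1)
    | none => if h = c then some 0 else none

-- the prefix of s before the first ')'
def tw (s : List Char) : List Char := s.takeWhile (fun c => c ≠ ')')

theorem tw_nil : tw [] = [] := rfl

theorem tw_cons (h : Char) (t : List Char) :
    tw (h :: t) = if h = ')' then [] else h :: tw t := by
  by_cases hc : h = ')' <;> simp [tw, hc]

theorem tw_length_le (s : List Char) : (tw s).length ≤ s.length :=
  (List.takeWhile_prefix _).length_le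

theorem tw_eq_of_length (s : List Char) (h : (tw s).length = s.length) : tw s = s :=
  List.IsPrefix.eq_of_length (List.takeWhile_prefix _) h

theorem tw_take (s : List Char) : s.take (tw s).length = tw s :=
  (List.prefix_iff_eq_take.mp (List.takeWhile_prefix _)).symm

theorem getLast?_cons_ne {α : Type} (a : α) (l : List α) (h : l ≠ []) :
    (a :: l).getLast? = l.getLast? := by
  cases l with
  | nil => exact absurd rfl h
  | cons b m => exact List.getLast?_cons_cons ..

-- list-level version of Source B's comprehension, with an arbitrary enumeration start
def posL (c : Char) (s : List Char) (k : Int) : List Int :=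
  ((PySem.List.enumerate s k).filter (fun p => p.2 = c)).map (fun p => p.1)

theorem positions_eq_posL (eq : String) (c : Char) :
    positions eq c = posL c eq.toList 0 := rfl

theorem posL_nil (c : Char) (k : Int) : posL c [] k = [] := by
  simp [posL, PySem.List.enumerate_nil]

theorem posL_cons (c h : Char) (s : List Char) (k : Int) :
    posL c (h :: s) k = if h = c then k :: posL c s (k + 1) else posL c s (k + 1) := by
  by_cases hc : h = c <;> simp [posL, PySem.List.enumerate_cons, hc]

theorem closes_head (s : List Char) (k : Int) :
    (match posL ')' s k with | [] => (-1 : Int) | c :: _ => c) =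
      if (tw s).length = s.length then -1 else k + (tw s).length := by
  induction s generalizing k with
  | nil => simp [posL_nil, tw_nil]
  | cons h t ih =>
    by_cases hc : h = ')'
    · rw [posL_cons, if_pos hc, tw_cons, if_pos hc]
      simp
    · rw [posL_cons, if_neg hc, tw_cons, if_neg hc, ih, List.length_cons, List.length_cons]
      by_cases hl : (tw t).length = t.length
      · rw [if_pos hl, if_pos (by omega)]
      · rw [if_neg hl, if_neg (by omega)]
        push_cast; ring

theorem posL_getLast (c : Char) (s : List Char) (k : Int) :
    (posL c s k).getLast? = (lastIdx c s).map (fun j : Nat => k + (j : Int)) := by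
  induction s generalizing k with
  | nil => simp [posL_nil, lastIdx]
  | cons h t ih =>
    rw [posL_cons]
    cases hj : lastIdx c t with
    | none =>
      have htail : posL c t (k + 1) = [] :=
        List.getLast?_eq_none_iff.mp (by rw [ih, hj]; rfl)
      by_cases hc : h = c <;> simp [hc, lastIdx, hj, htail]
    | some j =>
      have htail : (posL c t (k + 1)).getLast? = some ((k + 1) + (j : Int)) := by
        rw [ih, hj]; rfl
      have hne : posL c t (k + 1) ≠ [] := by
        intro h0; rw [h0] at htail; cases htail
      by_cases hc : h = c
      · rw [if_pos hc, getLast?_cons_ne _ _ hne, htail]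
        simp [lastIdx, hj]; ring
      · rw [if_neg hc, htail]
        simp [lastIdx, hj]; ring

theorem posL_filter_lt (c : Char) (s : List Char) (m : Nat) (hm : m ≤ s.length) :
    (posL c s 0).filter (fun i => decide (i < (m : Int))) = posL c (s.take m) 0 := by
  have hlen : (s.take m).length = m := by rw [List.length_take]; omega
  have hsplit : posL c s 0 = posL c (s.take m) 0 ++ posL c (s.drop m) (m : Int) := by
    rw [posL, posL, posL]
    conv_lhs => rw [← List.take_append_drop m s]
    rw [PySem.List.enumerate_append, hlen, List.filter_append, List.map_append, zero_add]
  rw [hsplit, List.filter_append]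
  have h1 : (posL c (s.take m) 0).filter (fun i => decide (i < (m : Int))) =
      posL c (s.take m) 0 := by
    apply List.filter_eq_self.mpr
    intro i hi
    obtain ⟨p, hp, rfl⟩ := List.mem_map.mp hi
    obtain ⟨kk, hk, rfl⟩ :=
      (PySem.List.mem_enumerate_iff _ _ _).mp (List.mem_of_mem_filter hp)
    rw [hlen] at hk
    simp only [zero_add]
    exact decide_eq_true (by exact_mod_cast hk)
  have h2 : (posL c (s.drop m) (m : Int)).filter (fun i => decide (i < (m : Int))) = [] := by
    apply List.filter_eq_nil_iff.mpr
    intro i hi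
    obtain ⟨p, hp, rfl⟩ := List.mem_map.mp hi
    obtain ⟨kk, hk, rfl⟩ :=
      (PySem.List.mem_enumerate_iff _ _ _).mp (List.mem_of_mem_filter hp)
    simp only [decide_eq_true_eq, not_lt]
    omega
  rw [h1, h2, List.append_nil]

-- the invariant of A's loop: first ')' splits the list; lb/i seed the answer
theorem bracketindexGo_eq (s : List Char) (i lb : Int) :
    bracketindexGo s i lb =
      ((match lastIdx '(' (tw s) with
        | some j => i + j
        | none => lb),
       if (tw s).length = s.length then -1 else i + (tw s).length) := by
  induction s generalizing i lb with
  | nil => simp [bracketindexGo, tw_nil, lastIdx]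
  | cons c cs ih =>
    by_cases hc : c = ')'
    · subst hc
      rw [bracketindexGo, tw_cons, if_pos rfl]
      simp [lastIdx]
    · rw [bracketindexGo, tw_cons, if_neg hc]
      rw [if_neg hc, ih, List.length_cons, List.length_cons, Prod.mk.injEq]
      constructor
      · cases h : lastIdx '(' (tw cs) with
        | some j => simp [lastIdx, h]; ring
        | none => by_cases hp : c = '(' <;> simp [lastIdx, h, hp]
      · by_cases hl : (tw cs).length = cs.length
        · rw [if_pos hl, if_pos (by omega)]
        · rw [if_neg hl, if_neg (by omega)]
          push_cast; ring

-- ===== VERDICT (by name: the statement is the Claim_ definition above) =====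
theorem bracketindex_spec : Claim_equal_bracketindex := by
  intro eq _
  unfold Spec_bracketindex bracketindex
  simp only [bracketindex_alt, positions_eq_posL]
  rw [bracketindexGo_eq]
  simp only [closes_head]
  by_cases hl : (tw eq.toList).length = eq.toList.length
  · have hts : tw eq.toList = eq.toList := tw_eq_of_length _ hl
    rw [if_pos hl, if_pos rfl, posL_getLast, hts]
    cases lastIdx '(' eq.toList <;> simp
  · have hr : ¬ ((0 : Int) + ((tw eq.toList).length : Int) = -1) := by omega
    rw [if_neg hl, if_neg hr, zero_add,
      posL_filter_lt _ _ _ (tw_length_le _), tw_take, posL_getLast]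
    cases lastIdx '(' (tw eq.toList) <;> simp
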